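-- pv_equiv track=rewrite | github.com/lwy0ever/hackerrank | Decibinary Numbers.py | decbinDecode
-- ===== SOURCE A (Python) =====
-- def decbinDecode(x):
--     ans = 0
--     l = 0
--     while x > 0:
--             ans += (x % 10) * (1 << l)
--             x //= 10
--             l += 1
--     return ans
-- ===== SOURCE B (Python) =====
-- def decbinDecode(x):
--     if x < 0:
--         return 0
--     ans = 0
--     for c in str(x):
--         ans = ans * 2 + int(c)
--     return ans
-- ===== Notes on version B (the rewrite author's own statement) =====
-- stated objective: alternative
-- what changed: Replaces the LSB-first loop that accumulates digit*(1<<l) with an explicit position counter by Horner's method over the decimal string of x, MSB-first, keeping only a doubling accumulator.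
import Mathlib
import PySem

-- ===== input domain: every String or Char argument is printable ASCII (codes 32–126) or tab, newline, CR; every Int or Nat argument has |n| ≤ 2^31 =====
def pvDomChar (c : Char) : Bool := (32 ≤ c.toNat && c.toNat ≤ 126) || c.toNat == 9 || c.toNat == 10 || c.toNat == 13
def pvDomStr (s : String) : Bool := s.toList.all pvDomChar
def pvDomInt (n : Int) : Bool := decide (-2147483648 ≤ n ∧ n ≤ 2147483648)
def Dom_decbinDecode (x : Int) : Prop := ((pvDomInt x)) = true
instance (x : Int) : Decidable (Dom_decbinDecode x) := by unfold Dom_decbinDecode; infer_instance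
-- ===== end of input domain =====

-- B replaces A's LSB-first loop (digit * (1 << l) with a position counter) by Horner's method
-- over the decimal string of x, MSB-first with a doubling accumulator; same cost, different decomposition.

-- ===== PORT A =====
-- while x > 0: ans += (x % 10) * (1 << l); x //= 10; l += 1
def decbinDecodeGo (x ans : Int) (l : Nat) : Int :=
  if x > 0 then
    decbinDecodeGo (PySem.Int.floordiv x 10) (ans + PySem.Int.mod x 10 * ((1 : Int) <<< l)) (l + 1)
  else ans
termination_by x.toNat
decreasing_by
  rw [PySem.Int.floordiv_eq_ediv_of_pos (by omega : (0:Int) < 10)]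
  omega

def decbinDecode (x : Int) : Int := decbinDecodeGo x 0 0

-- ===== PORT B =====
-- int(c) for a single digit character: exact here, since every character of str(x) for x ≥ 0 is a digit
def hornerStep (ans : Int) (c : Char) : Int := ans * 2 + ((c.toNat : Int) - 48)

def decbinDecode_alt (x : Int) : Int :=
  if x < 0 then 0
  else (PySem.Int.toChars x).foldl hornerStep 0

-- ===== PRECONDITION & SPEC =====
def Spec_decbinDecode (x : Int) (out : Int) : Prop := out = decbinDecode_alt x
instance (x : Int) (out : Int) : Decidable (Spec_decbinDecode x out) := by unfold Spec_decbinDecode; infer_instance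

-- ===== CLAIM (what is proved, stated in full; the proofs are below) =====
def Claim_equal_decbinDecode : Prop := ∀ (x : Int), Dom_decbinDecode x → Spec_decbinDecode x (decbinDecode x)

-- ===== LEMMAS AND PROOFS =====
-- the common value of both programs on a nonnegative input, as Horner recursion on the Nat
def pvW (m : Nat) : Int :=
  if m = 0 then 0 else 2 * pvW (m / 10) + ((m % 10 : Nat) : Int)
decreasing_by exact Nat.div_lt_self (by omega) (by omega)

lemma pv_digit_val {d : Nat} (h : d < 10) : ((Nat.digitChar d).toNat : Int) - 48 = d := by
  interval_cases d <;> decide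

lemma pv_horner_toDigits (m : Nat) :
    (Nat.toDigits 10 m).foldl hornerStep 0 = pvW m := by
  induction m using Nat.strong_induction_on with
  | _ m ih =>
    rw [Nat.toDigits_eq_if (by omega : 1 < 10)]
    by_cases h : m < 10
    · rw [if_pos h]
      simp only [List.foldl_cons, List.foldl_nil, hornerStep]
      rw [pvW]
      by_cases h0 : m = 0
      · subst h0; decide
      · rw [if_neg h0, pvW, if_pos (by omega : m / 10 = 0),
          Nat.mod_eq_of_lt h, pv_digit_val h]
        ring
    · rw [if_neg h, List.foldl_append, ih (m / 10) (Nat.div_lt_self (by omega) (by omega))]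
      simp only [List.foldl_cons, List.foldl_nil, hornerStep]
      rw [pv_digit_val (Nat.mod_lt m (by omega))]
      conv_rhs => rw [pvW, if_neg (by omega : ¬ m = 0)]
      ring

lemma pv_goA (m : Nat) : ∀ (ans : Int) (l : Nat),
    decbinDecodeGo (m : Int) ans l = ans + ((1 : Int) <<< l) * pvW m := by
  induction m using Nat.strong_induction_on with
  | _ m ih =>
    intro ans l
    rw [decbinDecodeGo]
    by_cases h0 : m = 0
    · subst h0
      rw [if_neg (by omega), pvW]
      simp
    · rw [if_pos (by exact_mod_cast Nat.pos_of_ne_zero h0),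
        show (10 : Int) = ((10 : Nat) : Int) by norm_num,
        PySem.Int.floordiv_natCast, PySem.Int.mod_natCast,
        ih (m / 10) (Nat.div_lt_self (by omega) (by omega))]
      conv_rhs => rw [pvW, if_neg h0]
      simp only [Int.shiftLeft_eq, pow_succ]
      ring

-- ===== VERDICT (by name: the statement is the Claim_ definition above) =====
theorem decbinDecode_spec : Claim_equal_decbinDecode := by
  intro x _
  unfold Spec_decbinDecode decbinDecode decbinDecode_alt
  by_cases hx : x < 0
  · rw [decbinDecodeGo, if_neg (by omega), if_pos hx]
  · rw [if_neg hx]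
    have hx' : x = ((x.toNat : Nat) : Int) := by omega
    rw [hx', pv_goA, PySem.Int.toChars, if_neg (by omega : ¬ ((x.toNat : Nat) : Int) < 0)]
    rw [Int.toNat_natCast, pv_horner_toDigits]
    simp
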